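-- pv_equiv track=rewrite | github.com/arnabs542/oj | leetcode/396.rotateFunction.py | maxRotateFunctionBruteForce
-- ===== SOURCE A (Python) =====
-- def maxRotateFunctionBruteForce(A) -> int:
--     # FIXME: time limit exceeded
--     if not A:
--         return 0
--     result = float('-inf')
--     for k in range(len(A)):
--         result = max(result, sum(
--             map(lambda i: i * A[(i + k) % len(A)], range(len(A)))
--         ))
--     return result
-- ===== SOURCE B (Python) =====
-- def maxRotateFunctionBruteForce(A) -> int:
--     # O(n) incremental recurrence: F(k) = F(k-1) + n*A[k-1] - sum(A)
--     if not A: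
--         return 0
--     n = len(A)
--     s = sum(A)
--     f = sum(i * x for i, x in enumerate(A))
--     best = f
--     for k in range(1, n):
--         f = f + n * A[k - 1] - s
--         if f > best:
--             best = f
--     return best
-- ===== Notes on version B (the rewrite author's own statement) =====
-- stated objective: faster
-- what changed: Replaces the brute-force per-rotation weighted sums with the incremental recurrence F(k)=F(k-1)+n*A[k-1]-sum(A), keeping a running maximum in one pass.
import Mathlib
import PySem

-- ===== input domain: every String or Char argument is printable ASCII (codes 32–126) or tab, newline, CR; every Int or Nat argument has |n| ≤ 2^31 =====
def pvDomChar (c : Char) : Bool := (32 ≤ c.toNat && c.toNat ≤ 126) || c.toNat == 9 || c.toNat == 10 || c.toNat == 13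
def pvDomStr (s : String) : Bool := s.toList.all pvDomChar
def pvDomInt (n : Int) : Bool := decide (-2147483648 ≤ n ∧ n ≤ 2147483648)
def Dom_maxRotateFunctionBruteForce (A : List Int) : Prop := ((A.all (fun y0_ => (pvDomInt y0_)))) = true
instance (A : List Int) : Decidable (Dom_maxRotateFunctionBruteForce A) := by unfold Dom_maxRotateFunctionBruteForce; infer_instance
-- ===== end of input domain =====

-- B replaces A's quadratic per-rotation weighted sums by the one-pass recurrence
-- F(k) = F(k-1) + n*A[k-1] - sum(A) with a running maximum (objective: faster).

-- ===== PORT A =====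
-- the per-rotation sum: sum(map(lambda i: i * A[(i + k) % len(A)], range(len(A))))
def rotSum (A : List Int) (k : Int) : Int :=
  (PySem.List.pyRange 0 (A.length) 1).foldl
    (fun acc i => acc + i * PySem.List.pyGetD A (PySem.Int.mod (i + k) (A.length)) 0) 0

def maxRotateFunctionBruteForce (A : List Int) : Int :=
  if A = [] then 0
  else
    -- result starts at float('-inf'), modelled as `none`; it is `some` after the
    -- first iteration (len(A) ≥ 1), so the final value is always an int.
    ((PySem.List.pyRange 0 (A.length) 1).foldl
      (fun (result : Option Int) k =>
        match result with
        | none => some (rotSum A k)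
        | some r => some (max r (rotSum A k))) none).getD 0

-- ===== PORT B =====
def maxRotateFunctionBruteForce_alt (A : List Int) : Int :=
  if A = [] then 0
  else
    let n : Int := A.length
    let s : Int := A.sum
    let f : Int := ((PySem.List.enumerate A 0).map (fun p => p.1 * p.2)).sum
    ((PySem.List.pyRange 1 n 1).foldl
      (fun (st : Int × Int) k =>
        let f' := st.1 + n * PySem.List.pyGetD A (k - 1) 0 - s
        (f', if f' > st.2 then f' else st.2)) (f, f)).2

-- ===== PRECONDITION & SPEC =====
def Spec_maxRotateFunctionBruteForce (A : List Int) (out : Int) : Prop := out = maxRotateFunctionBruteForce_alt A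
instance (A : List Int) (out : Int) : Decidable (Spec_maxRotateFunctionBruteForce A out) := by unfold Spec_maxRotateFunctionBruteForce; infer_instance

-- ===== CLAIM (what is proved, stated in full; the proofs are below) =====
def Claim_equal_maxRotateFunctionBruteForce : Prop := ∀ (A : List Int), Dom_maxRotateFunctionBruteForce A → Spec_maxRotateFunctionBruteForce A (maxRotateFunctionBruteForce A)

-- ===== LEMMAS AND PROOFS =====

-- weighted sum Σ i * B[i], generalised over the starting weight c
def wsumAux (c : Int) : List Int → Int
  | [] => 0
  | x :: t => c * x + wsumAux (c + 1) t

def wsum (B : List Int) : Int := wsumAux 0 B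

-- one left rotation
def rot1 : List Int → List Int
  | [] => []
  | a :: t => t ++ [a]

lemma wsumAux_append_singleton (t : List Int) (a : Int) :
    ∀ c, wsumAux c (t ++ [a]) = wsumAux c t + (c + t.length) * a := by
  induction t with
  | nil => intro c; simp [wsumAux]
  | cons x r ih =>
      intro c
      simp only [List.cons_append, wsumAux, ih (c + 1), List.length_cons]
      push_cast; ring

lemma wsumAux_succ (t : List Int) : ∀ c, wsumAux (c + 1) t = wsumAux c t + t.sum := by
  induction t with
  | nil => intro c; simp [wsumAux]
  | cons x r ih =>
      intro c
      simp only [wsumAux, ih (c + 1), ih c, List.sum_cons]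
      ring

lemma rot1_length (B : List Int) : (rot1 B).length = B.length := by
  cases B <;> simp [rot1]

lemma rot1_sum (B : List Int) : (rot1 B).sum = B.sum := by
  cases B with
  | nil => rfl
  | cons a t => simp [rot1]; ring

-- the recurrence: wsum(rot1 B) = wsum B + |B| * B[0] - sum B
lemma wsum_rot1 (a : Int) (t : List Int) :
    wsum (rot1 (a :: t)) = wsum (a :: t) + ((a :: t).length : Int) * a - (a :: t).sum := by
  have hs := wsumAux_succ t 0
  simp only [zero_add] at hs
  simp only [rot1, wsum, wsumAux, wsumAux_append_singleton, zero_add, hs,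
    List.sum_cons, List.length_cons]
  push_cast; ring

lemma wsum_rot1' (B : List Int) (hB : B ≠ []) :
    wsum (rot1 B) = wsum B + (B.length : Int) * B.getD 0 0 - B.sum := by
  cases B with
  | nil => exact absurd rfl hB
  | cons a t => simpa using wsum_rot1 a t

lemma rotIter_length (A : List Int) (m : Nat) : (rot1^[m] A).length = A.length := by
  induction m with
  | zero => rfl
  | succ m ih => rw [Function.iterate_succ_apply', rot1_length, ih]

lemma rotIter_sum (A : List Int) (m : Nat) : (rot1^[m] A).sum = A.sum := by
  induction m with
  | zero => rfl
  | succ m ih => rw [Function.iterate_succ_apply', rot1_sum, ih]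

-- elementwise description of rot1
lemma rot1_getD (B : List Int) (hB : B ≠ []) (i : Nat) (hi : i < B.length) :
    (rot1 B).getD i 0 = B.getD ((i + 1) % B.length) 0 := by
  cases B with
  | nil => exact absurd rfl hB
  | cons a t =>
      simp only [rot1, List.length_cons] at *
      by_cases h : i < t.length
      · have h1 : (i + 1) % (t.length + 1) = i + 1 := Nat.mod_eq_of_lt (by omega)
        simp [List.getD, List.getElem?_append_left h, h1]
      · have hit : i = t.length := by omega
        subst hit
        simp [List.getD]

-- elementwise description of iterated rotation
lemma rotIter_getD (A : List Int) (hA : A ≠ []) (m : Nat) :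
    ∀ i : Nat, i < A.length → (rot1^[m] A).getD i 0 = A.getD ((i + m) % A.length) 0 := by
  induction m with
  | zero => intro i hi; simp [Nat.mod_eq_of_lt hi]
  | succ m ih =>
      intro i hi
      have hlen : (rot1^[m] A).length = A.length := rotIter_length A m
      have hne : rot1^[m] A ≠ [] := by
        intro h; rw [h] at hlen; cases A <;> simp_all
      rw [Function.iterate_succ_apply', rot1_getD _ hne i (by omega), hlen,
        ih ((i + 1) % A.length) (Nat.mod_lt _ (by omega))]
      congr 1
      conv_rhs => rw [show i + (m + 1) = (i + 1) + m by ring, Nat.add_mod (i + 1) m]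
      rw [Nat.add_mod ((i + 1) % A.length) m, Nat.mod_mod_of_dvd _ dvd_rfl]

-- wsum as a range-indexed sum
lemma wsumAux_eq_range_sum (B : List Int) :
    ∀ c : Int, wsumAux c B = ((List.range B.length).map (fun i => (c + i) * B.getD i 0)).sum := by
  induction B with
  | nil => intro c; simp [wsumAux]
  | cons x t ih =>
      intro c
      rw [List.length_cons, List.range_succ_eq_map, List.map_cons, List.map_map, List.sum_cons]
      simp only [wsumAux, ih (c + 1)]
      congr 1
      · simp
      · apply congrArg List.sum
        apply List.map_congr_left
        intro i _
        simp only [Function.comp_apply, List.getD_cons_succ]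
        push_cast; ring

lemma wsum_eq_range_sum (B : List Int) :
    wsum B = ((List.range B.length).map (fun i : Nat => (i : Int) * B.getD i 0)).sum := by
  rw [wsum, wsumAux_eq_range_sum]
  apply congrArg List.sum
  apply List.map_congr_left
  intro i _
  simp

-- A's per-rotation sum is the weighted sum of the m-fold rotation
lemma rotSum_eq_wsum_rotIter (A : List Int) (hA : A ≠ []) (m : Nat) (_hm : m < A.length) :
    rotSum A (m : Int) = wsum (rot1^[m] A) := by
  have hn : 0 < A.length := List.length_pos_iff.mpr hA
  rw [rotSum, PySem.List.pyRange_zero_natCast, List.foldl_map, PySem.List.foldl_add, zero_add,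
    wsum_eq_range_sum, rotIter_length]
  apply congrArg List.sum
  apply List.map_congr_left
  intro i hi
  rw [List.mem_range] at hi
  have hcast : (i : Int) + (m : Int) = ((i + m : Nat) : Int) := by push_cast; ring
  rw [hcast, PySem.Int.mod_natCast, PySem.List.pyGetD_natCast,
    rotIter_getD A hA m i hi]

-- B's initial f equals wsum A
lemma enumerate_sum_eq_wsumAux (A : List Int) :
    ∀ s : Int, ((PySem.List.enumerate A s).map (fun p => p.1 * p.2)).sum = wsumAux s A := by
  induction A with
  | nil => intro s; simp [PySem.List.enumerate_nil, wsumAux]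
  | cons x t ih =>
      intro s
      rw [PySem.List.enumerate_cons, List.map_cons, List.sum_cons, ih (s + 1)]
      rfl

-- the Option-accumulator loop of A, once started, is a plain running max
lemma optfold (g : Int → Int) (l : List Int) :
    ∀ r : Int, l.foldl
      (fun (result : Option Int) k =>
        match result with
        | none => some (g k)
        | some r => some (max r (g k))) (some r)
      = some (l.foldl (fun x k => max x (g k)) r) := by
  induction l with
  | nil => intro r; rfl
  | cons x t ih => intro r; simp only [List.foldl_cons, ih]

-- main loop alignment: B's fold over k = j..n-1 computes the same running max
lemma mainFold (A : List Int) (hA : A ≠ []) :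
    ∀ (d j : Nat), 1 ≤ j → j + d = A.length → ∀ r : Int,
      ((PySem.List.pyRange (j : Int) (A.length) 1).foldl
        (fun (st : Int × Int) k =>
          let f' := st.1 + (A.length : Int) * PySem.List.pyGetD A (k - 1) 0 - A.sum
          (f', if f' > st.2 then f' else st.2)) (wsum (rot1^[j-1] A), r)).2
      = (PySem.List.pyRange (j : Int) (A.length) 1).foldl
          (fun x k => max x (rotSum A k)) r := by
  intro d
  induction d with
  | zero =>
      intro j h1 h2 r
      rw [PySem.List.pyRange_one_eq_nil (by omega)]
      rfl
  | succ d ih =>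
      intro j h1 h2 r
      have hjn : (j : Int) < (A.length : Int) := by omega
      rw [PySem.List.pyRange_one_cons hjn]
      simp only [List.foldl_cons]
      have hj1 : ((j : Int) - 1) = ((j - 1 : Nat) : Int) := by omega
      have hrec : wsum (rot1^[j-1] A) + (A.length : Int) * PySem.List.pyGetD A ((j : Int) - 1) 0 - A.sum
          = wsum (rot1^[j] A) := by
        have hiter : rot1^[j] A = rot1 (rot1^[j-1] A) := by
          rw [← Function.iterate_succ_apply' rot1 (j-1) A]
          congr 1; omega
        have hne : rot1^[j-1] A ≠ [] := by
          intro h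
          have := rotIter_length A (j-1)
          rw [h] at this; cases A <;> simp_all
        rw [hiter, wsum_rot1' _ hne, rotIter_length, rotIter_sum,
          rotIter_getD A hA (j-1) 0 (by omega)]
        rw [hj1, PySem.List.pyGetD_natCast]
        have : (0 + (j - 1)) % A.length = j - 1 := by
          rw [Nat.zero_add, Nat.mod_eq_of_lt (by omega)]
        rw [this]
      have hmax : ∀ v : Int, (if v > r then v else r) = max r v := by
        intro v; rw [max_def]; split_ifs <;> omega
      simp only [hrec, hmax]
      have hrs : rotSum A ((j : Int)) = wsum (rot1^[j] A) :=
        rotSum_eq_wsum_rotIter A hA j (by omega)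
      rw [hrs]
      have hsucc : ((j : Int) + 1) = ((j + 1 : Nat) : Int) := by omega
      rw [hsucc]
      exact ih (j + 1) (by omega) (by omega) (max r (wsum (rot1^[j] A)))

-- ===== VERDICT (by name: the statement is the Claim_ definition above) =====
theorem maxRotateFunctionBruteForce_spec : Claim_equal_maxRotateFunctionBruteForce := by
  intro A _hDom
  unfold Spec_maxRotateFunctionBruteForce maxRotateFunctionBruteForce maxRotateFunctionBruteForce_alt
  by_cases hA : A = []
  · simp [hA]
  · simp only [if_neg hA]
    have hn : 0 < A.length := List.length_pos_iff.mpr hA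
    have h01 : (0 : Int) < (A.length : Int) := by omega
    rw [PySem.List.pyRange_one_cons h01, List.foldl_cons]
    rw [optfold (fun k => rotSum A k) _ (rotSum A 0), Option.getD_some]
    rw [enumerate_sum_eq_wsumAux A 0, ← wsum]
    have h0 : rotSum A 0 = wsum A := by
      have := rotSum_eq_wsum_rotIter A hA 0 hn
      simpa using this
    have := mainFold A hA (A.length - 1) 1 (by omega) (by omega) (wsum A)
    simp only [Nat.sub_self, Function.iterate_zero, id, Nat.cast_one] at this
    rw [h0, zero_add, ← this]
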